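-- pv_equiv track=rewrite | github.com/Xayoteh/advent-of-code | 2016/puzzles/day18.py | count_safe_tiles
-- ===== SOURCE A (Python) =====
-- def count_safe_tiles(first_row: str, rows: int) -> int:
--     row_len = len(first_row)
--     safe_tiles = sum(tile == '.' for tile in first_row)
--     row_count = 1
--     prev_row = first_row
--
--     while row_count < rows:
--         row = ''.join(['^' if is_trap(i, prev_row) else '.' for i in range(row_len)])
--         safe_tiles += sum(tile == '.' for tile in row)
--         prev_row = row
--         row_count += 1
--
--     return safe_tiles
--
-- def is_trap(idx: int, prev_row: str) -> bool:
--     left = idx > 0 and prev_row[idx - 1] == '^'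
--     center = prev_row[idx] == '^'
--     right = idx < len(prev_row) - 1 and prev_row[idx + 1] == '^'
--
--     if left and center and not right: return True
--     if center and right and not left: return True
--     if left and not (center or right): return True
--     if right and not (center or left): return True
--
--     return False
-- ===== SOURCE B (Python) =====
-- def count_safe_tiles(first_row: str, rows: int) -> int:
--     n = len(first_row)
--     total = first_row.count('.')
--     cur = 0
--     for c in reversed(first_row):
--         cur = (1 if c == '^' else 0) + 2 * cur
--     mask = (1 << n) - 1
--     for _ in range(rows - 1):
--         cur = ((cur << 1) ^ (cur >> 1)) & mask
--         total += n - bin(cur).count("1")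
--     return total
-- ===== Notes on version B (the rewrite author's own statement) =====
-- stated objective: faster
-- what changed: Replaces the per-index neighbour-testing helper and per-row string building with whole-row integer bitmask arithmetic: next = ((cur<<1) ^ (cur>>1)) & mask, counting safe tiles via popcount.
import Mathlib
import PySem

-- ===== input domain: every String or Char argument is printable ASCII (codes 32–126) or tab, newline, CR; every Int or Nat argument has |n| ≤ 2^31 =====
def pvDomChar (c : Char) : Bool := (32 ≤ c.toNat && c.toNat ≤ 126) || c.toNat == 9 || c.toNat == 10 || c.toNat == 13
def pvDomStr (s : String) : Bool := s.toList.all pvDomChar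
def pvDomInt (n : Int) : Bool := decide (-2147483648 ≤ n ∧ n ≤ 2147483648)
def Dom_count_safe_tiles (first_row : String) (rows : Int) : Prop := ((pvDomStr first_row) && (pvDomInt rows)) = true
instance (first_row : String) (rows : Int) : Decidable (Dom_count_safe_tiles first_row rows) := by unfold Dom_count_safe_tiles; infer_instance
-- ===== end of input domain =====

-- B replaces the per-index neighbour-testing helper and row-string building with
-- whole-row integer bitmask arithmetic (next = ((cur<<1) ^ (cur>>1)) & mask, popcount):
-- objective 'faster' (measured constant-factor speedup).

-- ===== PORT A =====
def is_trap (idx : Int) (prev : List Char) : Bool :=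
  let left := decide (idx > 0) && (PySem.List.pyGet? prev (idx - 1) == some '^')
  let center := PySem.List.pyGet? prev idx == some '^'
  let right := decide (idx < (prev.length : Int) - 1) && (PySem.List.pyGet? prev (idx + 1) == some '^')
  if left && center && !right then true
  else if center && right && !left then true
  else if left && !(center || right) then true
  else if right && !(center || left) then true
  else false

def aLoop (rowLen : Int) : Nat → List Char → Int → Int
  | 0, _, safe => safe
  | k+1, prev, safe =>
    let row := (PySem.List.pyRange 0 rowLen 1).map (fun i => if is_trap i prev then '^' else '.')
    aLoop rowLen k row (safe + (row.countP (· == '.') : Int))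

def count_safe_tiles (first_row : String) (rows : Int) : Int :=
  let l := first_row.toList
  let rowLen : Int := l.length
  let safe : Int := l.countP (· == '.')
  aLoop rowLen (rows - 1).toNat l safe

-- ===== PORT B =====
-- port of Source B's bin(cur).count("1") (Python's popcount idiom)
def popCount (n : Nat) : Nat :=
  if n = 0 then 0 else n % 2 + popCount (n / 2)
decreasing_by exact Nat.div_lt_self (Nat.pos_of_ne_zero (by assumption)) (by omega)

-- port of Source B's reversed-order accumulation loop building the trap bitmask
def maskOf (l : List Char) : Nat :=
  l.foldr (fun c acc => (if c == '^' then 1 else 0) + 2 * acc) 0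

def bLoop (n : Nat) (mask : Nat) : Nat → Nat → Int → Int
  | 0, _, total => total
  | k+1, cur, total =>
    let next := ((cur <<< 1) ^^^ (cur >>> 1)) &&& mask
    bLoop n mask k next (total + ((n : Int) - (popCount next : Int)))

def count_safe_tiles_alt (first_row : String) (rows : Int) : Int :=
  let l := first_row.toList
  let n := l.length
  let total : Int := l.countP (· == '.')
  bLoop n (2 ^ n - 1) (rows - 1).toNat (maskOf l) total

-- ===== PRECONDITION & SPEC =====
def Spec_count_safe_tiles (first_row : String) (rows : Int) (out : Int) : Prop := out = count_safe_tiles_alt first_row rows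
instance (first_row : String) (rows : Int) (out : Int) : Decidable (Spec_count_safe_tiles first_row rows out) := by unfold Spec_count_safe_tiles; infer_instance

-- ===== CLAIM (what is proved, stated in full; the proofs are below) =====
def Claim_equal_count_safe_tiles : Prop := ∀ (first_row : String) (rows : Int), Dom_count_safe_tiles first_row rows → Spec_count_safe_tiles first_row rows (count_safe_tiles first_row rows)

-- ===== LEMMAS AND PROOFS =====

theorem maskOf_cons (c : Char) (t : List Char) :
    maskOf (c :: t) = (if c == '^' then 1 else 0) + 2 * maskOf t := rfl

theorem maskOf_testBit (l : List Char) (i : Nat) :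
    (maskOf l).testBit i = decide (l[i]? = some '^') := by
  induction l generalizing i with
  | nil => simp [maskOf]
  | cons c t ih =>
    rw [maskOf_cons]
    cases i with
    | zero =>
      rw [Nat.testBit_zero]
      by_cases h : c = '^' <;> simp [h, Nat.add_mul_mod_self_left]
    | succ i =>
      rw [Nat.testBit_add_one]
      have : ((if c == '^' then 1 else 0) + 2 * maskOf t) / 2 = maskOf t := by
        split <;> omega
      rw [this, ih]
      simp

theorem popCount_step (b M : Nat) (hb : b ≤ 1) : popCount (b + 2 * M) = b + popCount M := by
  by_cases h : b + 2 * M = 0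
  · have hb0 : b = 0 := by omega
    have hM : M = 0 := by omega
    simp [hb0, hM, popCount]
  · rw [popCount, if_neg h]
    have h1 : (b + 2 * M) % 2 = b := by omega
    have h2 : (b + 2 * M) / 2 = M := by omega
    rw [h1, h2]

theorem popCount_maskOf (l : List Char) : popCount (maskOf l) = l.countP (· == '^') := by
  induction l with
  | nil => simp [maskOf, popCount]
  | cons c t ih =>
    rw [maskOf_cons, popCount_step _ _ (by split <;> omega), ih, List.countP_cons]
    by_cases h : c = '^' <;> simp [h]
    omega

theorem trap_table (l c r : Bool) :
    (if l && c && !r then true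
     else if c && r && !l then true
     else if l && !(c || r) then true
     else if r && !(c || l) then true
     else false) = (l ^^ r) := by
  cases l <;> cases c <;> cases r <;> rfl

theorem is_trap_eq (prev : List Char) (i : Nat) (hi : i < prev.length) :
    is_trap (i : Int) prev = ((maskOf prev <<< 1) ^^^ (maskOf prev >>> 1)).testBit i := by
  have hL : (maskOf prev <<< 1).testBit i
      = (decide ((i : Int) > 0) && (PySem.List.pyGet? prev ((i : Int) - 1) == some '^')) := by
    rw [Nat.testBit_shiftLeft]
    cases i with
    | zero => simp
    | succ j =>
      have h1 : ((j + 1 : Nat) : Int) - 1 = (j : Int) := by push_cast; ring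
      rw [h1, PySem.List.pyGet?_natCast, maskOf_testBit]
      simp only [Bool.beq_eq_decide_eq]
      simp
  have hR : (maskOf prev >>> 1).testBit i
      = (decide ((i : Int) < (prev.length : Int) - 1) && (PySem.List.pyGet? prev ((i : Int) + 1) == some '^')) := by
    rw [Nat.testBit_shiftRight]
    have hadd : 1 + i = i + 1 := Nat.add_comm 1 i
    rw [hadd, maskOf_testBit]
    have h1 : ((i : Int) + 1) = ((i + 1 : Nat) : Int) := by push_cast; ring
    rw [h1, PySem.List.pyGet?_natCast]
    by_cases h : i + 1 < prev.length
    · have hlt : (i : Int) < (prev.length : Int) - 1 := by omega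
      simp only [Bool.beq_eq_decide_eq]
      simp [hlt]
    · have h2 : prev[i+1]? = none := by
        rw [List.getElem?_eq_none] ; omega
      have h3 : ¬ ((i : Int) < (prev.length : Int) - 1) := by omega
      simp [h2, h3]
  rw [Nat.testBit_xor, hL, hR]
  simp only [is_trap]
  exact trap_table _ _ _

theorem maskOf_row (prev : List Char) :
    maskOf ((PySem.List.pyRange 0 (prev.length : Int) 1).map (fun i => if is_trap i prev then '^' else '.'))
      = ((maskOf prev <<< 1) ^^^ (maskOf prev >>> 1)) &&& (2 ^ prev.length - 1) := by
  apply Nat.eq_of_testBit_eq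
  intro i
  rw [maskOf_testBit, Nat.testBit_and, Nat.testBit_two_pow_sub_one]
  by_cases hi : i < prev.length
  · rw [PySem.List.getElem?_map_pyRange_zero _ _ _ hi, ← is_trap_eq prev i hi]
    by_cases h : is_trap (i : Int) prev <;> simp [h, hi]
  · have hlen : ((PySem.List.pyRange 0 (prev.length : Int) 1).map (fun i => if is_trap i prev then '^' else '.')).length = prev.length := by
      simp [PySem.List.length_pyRange_one]
    have : ((PySem.List.pyRange 0 (prev.length : Int) 1).map (fun i => if is_trap i prev then '^' else '.'))[i]? = none := by
      rw [List.getElem?_eq_none]; omega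
    simp [hi]

theorem count_dot (l : List Char) (h : ∀ c ∈ l, c = '^' ∨ c = '.') :
    l.countP (· == '.') + l.countP (· == '^') = l.length := by
  induction l with
  | nil => simp
  | cons c t ih =>
    have hc := h c (by simp)
    have ht := ih (fun x hx => h x (by simp [hx]))
    rcases hc with h1 | h1 <;> simp [h1] <;> omega

theorem loop_eq (fuel : Nat) (prev : List Char) (n : Nat) (hn : prev.length = n) (safe : Int) :
    aLoop (n : Int) fuel prev safe = bLoop n (2 ^ n - 1) fuel (maskOf prev) safe := by
  induction fuel generalizing prev safe with
  | zero => rfl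
  | succ k ih =>
    rw [aLoop, bLoop]
    set row := (PySem.List.pyRange 0 (n : Int) 1).map (fun i => if is_trap i prev then '^' else '.') with hrow
    have hmask : maskOf row = ((maskOf prev <<< 1) ^^^ (maskOf prev >>> 1)) &&& (2 ^ n - 1) := by
      rw [hrow, ← hn, maskOf_row]
    have hlenrow : row.length = n := by
      simp [hrow, PySem.List.length_pyRange_one]
    have hmem : ∀ c ∈ row, c = '^' ∨ c = '.' := by
      intro c hc
      rw [hrow] at hc
      rcases List.mem_map.mp hc with ⟨j, _, hj⟩
      by_cases h : is_trap j prev <;> simp [h] at hj <;> [exact Or.inl hj.symm; exact Or.inr hj.symm]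
    have hcount := count_dot row hmem
    have hpop : popCount (maskOf row) = row.countP (· == '^') := popCount_maskOf row
    have hcast : (row.countP (· == '.') : Int)
        = (n : Int) - (popCount (((maskOf prev <<< 1) ^^^ (maskOf prev >>> 1)) &&& (2 ^ n - 1)) : Int) := by
      rw [← hmask, hpop]
      rw [hlenrow] at hcount
      omega
    rw [hcast, ← hmask]
    exact ih row hlenrow _

-- ===== VERDICT (by name: the statement is the Claim_ definition above) =====
theorem count_safe_tiles_spec : Claim_equal_count_safe_tiles := by
  intro s rows _
  unfold Spec_count_safe_tiles count_safe_tiles count_safe_tiles_alt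
  exact loop_eq _ _ _ rfl _
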